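-- pv_equiv track=rewrite | github.com/jiwonniddaaa/programmers-2408 | 할인 행사.py | solution
-- ===== SOURCE A (Python) =====
-- def solution(want, number, discount):
--     # 회원 등록 날짜 수
--     member_days = 0
--
--     for i in range(len(discount) - 9):  # i~i+10일간 할인 목록
--         is_valid = True
--
--         # want-number 모두 충족 확인
--         for j in range(len(want)):
--             # want[i]가 discount에 몇번 나오는지 확인
--             if discount[i:i + 10].count(want[j]) < number[j]:
--                 is_valid = False
--                 break
--
--         if is_valid:
--             member_days += 1
--
--     return member_days
-- ===== SOURCE B (Python) =====
-- def solution(want, number, discount):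
--     n = len(discount)
--     if n < 10:
--         return 0
--     # requirement per distinct item (duplicates in want collapse to the max demand)
--     need = {}
--     for w, m in zip(want, number):
--         if w not in need or m > need[w]:
--             need[w] = m
--     # counts of the current 10-day window, maintained incrementally
--     cnt = {}
--     for d in discount[:10]:
--         cnt[d] = cnt.get(d, 0) + 1
--     answer = 1 if all(cnt.get(w, 0) >= m for w, m in need.items()) else 0
--     for i in range(10, n):
--         out = discount[i - 10]
--         cnt[out] = cnt.get(out, 0) - 1
--         inc = discount[i]
--         cnt[inc] = cnt.get(inc, 0) + 1
--         if all(cnt.get(w, 0) >= m for w, m in need.items()):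
--             answer += 1
--     return answer
-- ===== Notes on version B (the rewrite author's own statement) =====
-- stated objective: alternative
-- what changed: Instead of re-slicing the 10-day window and calling .count once per wanted item for every start index, B collapses the requirements into a max-demand dict built once and maintains a single sliding-window counter incrementally (one element enters, one leaves per step), checking each window against the distinct requirements.
-- outside the precondition, e.g. on solution(['a', 'x'], [100], ['a', 'a', 'a', 'a', 'a', 'a', 'a', 'a', 'a', 'a']): A returns 0, B returns 0
import Mathlib
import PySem

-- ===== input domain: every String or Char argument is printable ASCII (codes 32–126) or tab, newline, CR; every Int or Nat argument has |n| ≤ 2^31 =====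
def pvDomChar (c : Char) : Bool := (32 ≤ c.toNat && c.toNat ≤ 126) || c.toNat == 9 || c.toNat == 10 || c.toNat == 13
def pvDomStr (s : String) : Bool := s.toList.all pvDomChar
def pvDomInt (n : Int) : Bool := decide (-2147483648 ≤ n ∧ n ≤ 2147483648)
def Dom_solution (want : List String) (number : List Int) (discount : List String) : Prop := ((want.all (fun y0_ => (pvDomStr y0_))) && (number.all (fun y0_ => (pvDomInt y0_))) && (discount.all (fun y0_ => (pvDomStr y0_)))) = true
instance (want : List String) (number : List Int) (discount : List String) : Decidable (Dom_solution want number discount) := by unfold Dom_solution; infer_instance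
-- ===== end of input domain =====

-- B replaces A's per-window slice-and-count over every wanted item by a max-demand dict built
-- once plus an incrementally maintained sliding-window counter (objective: alternative algorithm).

-- ===== PORT A =====
-- the inner 'for j in range(len(want))' loop with its break; the 'none' match arm is the
-- IndexError input (number shorter than want), excluded by Pre_solution
def solInner (want : List String) (number : List Int) (win : List String) : List Int → Bool
  | [] => true
  | j :: js =>
    match PySem.List.pyGet? want j, PySem.List.pyGet? number j with
    | some w, some m =>
        if (PySem.List.count win w : Int) < m then false
        else solInner want number win js
    | _, _ => false

def solution (want : List String) (number : List Int) (discount : List String) : Int :=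
  (PySem.List.pyRange 0 (PySem.List.len discount - 9) 1).foldl
    (fun acc i =>
      if solInner want number (PySem.List.slice discount (some i) (some (i + 10)))
           (PySem.List.pyRange 0 (PySem.List.len want) 1)
      then acc + 1 else acc) 0

-- ===== PORT B =====
-- 'if w not in need or m > need[w]: need[w] = m'
def bNeedStep (d : PySem.Dict String Int) (p : String × Int) : PySem.Dict String Int :=
  if !(d.contains p.1) || d.getD p.1 0 < p.2 then d.insert p.1 p.2 else d

-- the 'for w, m in zip(want, number)' loop building the max-demand dict
def bNeed (want : List String) (number : List Int) : PySem.Dict String Int :=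
  (want.zip number).foldl bNeedStep PySem.Dict.empty

-- 'all(cnt.get(w, 0) >= m for w, m in need.items())'
def bOk (need cnt : PySem.Dict String Int) : Bool :=
  need.items.all (fun p => decide (p.2 ≤ cnt.getD p.1 0))

-- one iteration of 'for i in range(10, n)': drop discount[i-10], add discount[i], test the window
def bStep (need : PySem.Dict String Int) (discount : List String)
    (s : PySem.Dict String Int × Int) (i : Int) : PySem.Dict String Int × Int :=
  let out := PySem.List.pyGetD discount (i - 10) ""
  let c1 := s.1.insert out (s.1.getD out 0 - 1)
  let inc := PySem.List.pyGetD discount i ""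
  let c2 := c1.insert inc (c1.getD inc 0 + 1)
  (c2, if bOk need c2 then s.2 + 1 else s.2)

def solution_alt (want : List String) (number : List Int) (discount : List String) : Int :=
  let n := PySem.List.len discount
  if n < 10 then 0
  else
    let need := bNeed want number
    -- 'for d in discount[:10]: cnt[d] = cnt.get(d, 0) + 1'
    let cnt0 := (PySem.List.slice discount none (some 10)).foldl
      (fun d x => d.insert x (d.getD x 0 + 1)) PySem.Dict.empty
    let answer0 : Int := if bOk need cnt0 then 1 else 0
    ((PySem.List.pyRange 10 n 1).foldl (bStep need discount) (cnt0, answer0)).2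

-- ===== PRECONDITION & SPEC =====
-- Pre_ excludes inputs where want is longer than number and there are full 10-day windows:
-- there A raises IndexError (number[j]) whenever some window meets the first len(number)
-- demands; on those inputs where A happens to return (every window already failed an earlier
-- demand), its value is 0 and B returns 0 too.
def Pre_solution (want : List String) (number : List Int) (discount : List String) : Prop :=
  want.length ≤ number.length ∨ discount.length < 10
instance (want : List String) (number : List Int) (discount : List String) : Decidable (Pre_solution want number discount) := by unfold Pre_solution; infer_instance

def pvWitness_solution : List String × List Int × List String :=
  (["a"], [1], ["a", "a", "b", "a", "a", "a", "a", "a", "a", "a", "b"])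

def Spec_solution (want : List String) (number : List Int) (discount : List String) (out : Int) : Prop := out = solution_alt want number discount
instance (want : List String) (number : List Int) (discount : List String) (out : Int) : Decidable (Spec_solution want number discount out) := by unfold Spec_solution; infer_instance

-- ===== CLAIM (what is proved, stated in full; the proofs are below) =====
def Claim_equal_solution : Prop := ∀ (want : List String) (number : List Int) (discount : List String), Dom_solution want number discount → Pre_solution want number discount → Spec_solution want number discount (solution want number discount)

-- ===== LEMMAS AND PROOFS =====

-- the common reference predicate: the window meets every (item, demand) pair of zip(want, number)
def pvOkL (want : List String) (number : List Int) (win : List String) : Bool :=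
  (want.zip number).all (fun p => decide (p.2 ≤ (List.count p.1 win : Int)))

-- ---- A side: the counting loop is countP of pvOkL over all window starts ----

theorem solInner_eq_aux (want : List String) (number : List Int) (win : List String)
    (h : want.length ≤ number.length) :
    ∀ (k j : Nat), j + k = want.length →
      solInner want number win (PySem.List.pyRange (j:Int) (want.length:Int) 1)
        = ((want.drop j).zip (number.drop j)).all (fun p => decide (p.2 ≤ (List.count p.1 win : Int))) := by
  intro k
  induction k with
  | zero =>
    intro j hj
    rw [PySem.List.pyRange_one_eq_nil (by omega)]
    rw [List.drop_of_length_le (by omega)]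
    simp [solInner]
  | succ k ih =>
    intro j hj
    have hjw : j < want.length := by omega
    have hjn : j < number.length := by omega
    rw [PySem.List.pyRange_one_cons (by exact_mod_cast hjw)]
    have hcast : ((j : Int) + 1) = ((j + 1 : Nat) : Int) := by push_cast; ring
    rw [hcast]
    have hw : PySem.List.pyGet? want (j : Int) = some want[j] :=
      PySem.List.pyGet?_ofNat want j hjw
    have hn : PySem.List.pyGet? number (j : Int) = some number[j] :=
      PySem.List.pyGet?_ofNat number j hjn
    rw [← List.getElem_cons_drop hjw, ← List.getElem_cons_drop hjn]
    simp only [solInner, hw, hn, List.zip_cons_cons, List.all_cons]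
    rw [PySem.List.count_eq]
    by_cases hlt : (List.count want[j] win : Int) < number[j]
    · simp [hlt, not_le.mpr hlt]
    · simp only [if_neg hlt]
      rw [ih (j + 1) (by omega)]
      simp [not_lt.mp hlt]

theorem solInner_eq (want : List String) (number : List Int) (win : List String)
    (h : want.length ≤ number.length) :
    solInner want number win (PySem.List.pyRange 0 (PySem.List.len want) 1)
      = pvOkL want number win := by
  have := solInner_eq_aux want number win h want.length 0 (by omega)
  simpa [PySem.List.len_eq, pvOkL] using this

theorem solution_eq_countP (want : List String) (number : List Int) (discount : List String)
    (h : want.length ≤ number.length) :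
    solution want number discount
      = ((List.range (discount.length - 9)).countP
          (fun a => pvOkL want number ((discount.drop a).take 10)) : Int) := by
  unfold solution
  rw [PySem.List.pyRange_one 0 (PySem.List.len discount - 9)]
  rw [List.foldl_map]
  rw [PySem.List.foldl_if_add_one
      (fun k : Nat => solInner want number
        (PySem.List.slice discount (some ((0:Int) + k)) (some ((0:Int) + k + 10)))
        (PySem.List.pyRange 0 (PySem.List.len want) 1))]
  have hn : (PySem.List.len discount - 9 - 0).toNat = discount.length - 9 := by
    simp [PySem.List.len_eq]; omega
  rw [hn, zero_add]
  congr 1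
  apply List.countP_congr
  intro a _
  have hc : ((a : Int) + 10) = ((a + 10 : Nat) : Int) := by push_cast; ring
  rw [show ((0:Int) + (a:Int)) = ((a:Nat):Int) by ring, hc,
      PySem.List.slice_natCast, solInner_eq want number _ h, Nat.add_sub_cancel_left]

-- ---- B side: the max-demand dict checks exactly the zip(want, number) demands ----

theorem bNeedStep_keys_nodup (d : PySem.Dict String Int) (p : String × Int)
    (hd : d.keys.Nodup) : (bNeedStep d p).keys.Nodup := by
  unfold bNeedStep
  split
  · exact PySem.Dict.nodup_keys_insert d p.1 p.2 hd
  · exact hd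

theorem bNeedStep_all (f : String → Int) (d : PySem.Dict String Int)
    (hd : d.keys.Nodup) (p : String × Int) :
    ((bNeedStep d p).items.all (fun q => decide (q.2 ≤ f q.1)) = true)
      ↔ ((d.items.all (fun q => decide (q.2 ≤ f q.1)) = true) ∧ p.2 ≤ f p.1) := by
  simp only [List.all_eq_true, decide_eq_true_eq]
  unfold bNeedStep
  split
  case isTrue hc =>
    -- inserted (new key, or the demand grew)
    constructor
    · intro h
      have hp : p.2 ≤ f p.1 := by
        have := h (p.1, p.2) (by rw [PySem.Dict.mem_items_insert]; left; rfl)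
        simpa using this
      refine ⟨fun q hq => ?_, hp⟩
      obtain ⟨q1, q2⟩ := q
      simp only at *
      by_cases hk : q1 = p.1
      · -- q is the overwritten entry at key p.1: its demand was strictly smaller
        have hcont : d.contains p.1 = true := by
          rw [PySem.Dict.contains_iff_mem_keys]
          rw [← hk]
          exact PySem.Dict.mem_keys_of_mem_items d hq
        have hlt : d.getD p.1 0 < p.2 := by
          simp only [Bool.or_eq_true, Bool.not_eq_true', decide_eq_true_eq] at hc
          rcases hc with hc | hc
          · rw [hcont] at hc; cases hc
          · exact hc
        have hq2 : d.getD q1 0 = q2 := PySem.Dict.getD_of_mem_items d hq hd 0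
        have hlt2 : q2 < p.2 := by rw [← hq2, hk]; exact hlt
        rw [hk]
        exact le_of_lt (lt_of_lt_of_le hlt2 hp)
      · exact h (q1, q2) (by rw [PySem.Dict.mem_items_insert]; right; exact ⟨hq, hk⟩)
    · rintro ⟨h, hp⟩
      intro q hq
      rw [PySem.Dict.mem_items_insert] at hq
      rcases hq with rfl | ⟨hq, _⟩
      · exact hp
      · exact h q hq
  case isFalse hc =>
    -- unchanged: the key is present with an at-least-as-large demand
    simp only [Bool.or_eq_true, Bool.not_eq_true', decide_eq_true_eq, not_or,
      Bool.not_eq_false, not_lt] at hc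
    obtain ⟨hcont, hge'⟩ := hc
    constructor
    · intro h
      refine ⟨h, ?_⟩
      obtain ⟨v, hv⟩ : ∃ v, d.get? p.1 = some v := by
        rcases h' : d.get? p.1 with _ | v
        · rw [PySem.Dict.get?_eq_none_iff_contains] at h'
          rw [h'] at hcont; cases hcont
        · exact ⟨v, rfl⟩
      have hmem : (p.1, v) ∈ d.items := PySem.Dict.mem_items_of_get?_eq_some d hv
      have := h (p.1, v) hmem
      have hvd : d.getD p.1 0 = v := PySem.Dict.getD_of_get?_eq_some d 0 hv
      simp only at this
      omega
    · exact fun h => h.1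

theorem bNeed_all_aux (f : String → Int) :
    ∀ (pairs : List (String × Int)) (d : PySem.Dict String Int), d.keys.Nodup →
      (((pairs.foldl bNeedStep d).items.all (fun q => decide (q.2 ≤ f q.1)) = true)
        ↔ ((d.items.all (fun q => decide (q.2 ≤ f q.1)) = true) ∧ ∀ q ∈ pairs, q.2 ≤ f q.1)) := by
  intro pairs
  induction pairs with
  | nil => intro d hd; simp
  | cons p ps ih =>
    intro d hd
    rw [List.foldl_cons, ih (bNeedStep d p) (bNeedStep_keys_nodup d p hd),
        bNeedStep_all f d hd p]
    constructor
    · rintro ⟨⟨h1, h2⟩, h3⟩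
      refine ⟨h1, ?_⟩
      intro q hq
      rw [List.mem_cons] at hq
      rcases hq with rfl | hq
      · exact h2
      · exact h3 q hq
    · rintro ⟨h1, h2⟩
      exact ⟨⟨h1, h2 p (List.mem_cons_self)⟩, fun q hq => h2 q (List.mem_cons_of_mem p hq)⟩

theorem bOk_eq (want : List String) (number : List Int) (c : PySem.Dict String Int) :
    bOk (bNeed want number) c
      = (want.zip number).all (fun p => decide (p.2 ≤ c.getD p.1 0)) := by
  rw [Bool.eq_iff_iff]
  unfold bOk bNeed
  rw [bNeed_all_aux (fun w => c.getD w 0) (want.zip number) PySem.Dict.empty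
      (by rw [PySem.Dict.keys_empty]; exact List.nodup_nil)]
  simp [PySem.Dict.empty]

-- ---- B side: the sliding counter tracks the counts of the current 10-day window ----

theorem count_shift (discount : List String) (t : Nat) (h : t + 10 < discount.length)
    (w : String) :
    (((discount.drop (t+1)).take 10).count w : Int)
      = (((discount.drop t).take 10).count w : Int)
        - (if w = discount[t] then 1 else 0)
        + (if w = discount[t+10]'(by omega) then 1 else 0) := by
  have ht : t < discount.length := by omega
  have ha : (discount.drop t).take 10 = discount[t] :: (discount.drop (t+1)).take 9 := by
    rw [← List.getElem_cons_drop ht, List.take_succ_cons]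
  have hb : (discount.drop (t+1)).take 10
      = (discount.drop (t+1)).take 9 ++ [discount[t+10]'(by omega)] := by
    have h10 := List.take_add_one (l := discount.drop (t+1)) (i := 9)
    norm_num at h10
    rw [h10, List.getElem?_eq_getElem (show t+1+9 < discount.length by omega)]
    rfl
  rw [ha, hb]
  simp only [List.count_cons, List.count_append, List.count_nil, beq_iff_eq]
  simp only [eq_comm (a := w)]
  by_cases hA : discount[t] = w <;> by_cases hB : discount[t+10]'(by omega) = w <;>
    simp [hA, hB]

theorem bLoop_inv (want : List String) (number : List Int) (discount : List String)
    (cnt0 : PySem.Dict String Int)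
    (hcnt0 : ∀ w, cnt0.getD w 0 = (((discount.drop 0).take 10).count w : Int))
    (ans0 : Int) :
    ∀ t, t + 10 ≤ discount.length →
      (∀ w, (((List.range t).map (fun k : Nat => (10:Int) + (k:Int))).foldl
          (bStep (bNeed want number) discount) (cnt0, ans0)).1.getD w 0
        = (((discount.drop t).take 10).count w : Int))
      ∧ (((List.range t).map (fun k : Nat => (10:Int) + (k:Int))).foldl
          (bStep (bNeed want number) discount) (cnt0, ans0)).2
        = ans0 + ((List.range t).countP
            (fun a => pvOkL want number ((discount.drop (a+1)).take 10)) : Int) := by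
  intro t
  induction t with
  | zero =>
    intro _
    constructor
    · simpa using hcnt0
    · simp
  | succ t ih =>
    intro ht
    obtain ⟨ih1, ih2⟩ := ih (by omega)
    have htl : t < discount.length := by omega
    have htl10 : t + 10 < discount.length := by omega
    rw [List.range_succ, List.map_append, List.foldl_append]
    set s := ((List.range t).map (fun k : Nat => (10:Int) + (k:Int))).foldl
      (bStep (bNeed want number) discount) (cnt0, ans0) with hs
    simp only [List.map_cons, List.map_nil, List.foldl_cons, List.foldl_nil]
    have hout : PySem.List.pyGetD discount ((10:Int) + t - 10) "" = discount[t] := by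
      rw [show ((10:Int) + t - 10) = ((t : Nat) : Int) by omega,
          PySem.List.pyGetD_natCast, List.getD_eq_getElem discount "" htl]
    have hinc : PySem.List.pyGetD discount ((10:Int) + t) "" = discount[t+10]'htl10 := by
      rw [show ((10:Int) + t) = ((t + 10 : Nat) : Int) by omega,
          PySem.List.pyGetD_natCast, List.getD_eq_getElem discount "" htl10]
    unfold bStep
    simp only [hout, hinc]
    set out := discount[t] with hout'
    set inc := discount[t+10]'htl10 with hinc'
    set c1 := s.1.insert out (s.1.getD out 0 - 1) with hc1
    set c2 := c1.insert inc (c1.getD inc 0 + 1) with hc2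
    have hc1D : ∀ w, c1.getD w 0 = if w = out then s.1.getD out 0 - 1 else s.1.getD w 0 := by
      intro w; rw [hc1, PySem.Dict.getD_insert]
    have key : ∀ w, c2.getD w 0 = s.1.getD w 0
        - (if w = out then 1 else 0) + (if w = inc then 1 else 0) := by
      intro w
      rw [hc2, PySem.Dict.getD_insert, hc1D inc, hc1D w]
      by_cases h1 : w = inc
      · rw [if_pos h1, h1, if_pos rfl]
        by_cases h3 : inc = out
        · rw [if_pos h3, if_pos h3, h3]
        · rw [if_neg h3, if_neg h3]
          omega
      · rw [if_neg h1, if_neg h1]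
        by_cases h2 : w = out
        · rw [if_pos h2, if_pos h2, h2]
          omega
        · rw [if_neg h2, if_neg h2]
          omega
    have hc2D : ∀ w, c2.getD w 0
        = (((discount.drop (t+1)).take 10).count w : Int) := by
      intro w
      rw [key w, ih1 w, count_shift discount t htl10 w, ← hinc', ← hout']
    refine ⟨fun w => hc2D w, ?_⟩
    have hok : bOk (bNeed want number) c2
        = pvOkL want number ((discount.drop (t+1)).take 10) := by
      rw [bOk_eq]
      unfold pvOkL
      congr 1
      funext p
      rw [hc2D p.1]
    rw [hok, ih2, List.countP_append]
    simp only [List.countP_cons, List.countP_nil]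
    by_cases hp : pvOkL want number ((discount.drop (t+1)).take 10) = true
    · simp [hp]; omega
    · simp [hp]

theorem solution_alt_eq_countP (want : List String) (number : List Int)
    (discount : List String) :
    solution_alt want number discount
      = ((List.range (discount.length - 9)).countP
          (fun a => pvOkL want number ((discount.drop a).take 10)) : Int) := by
  simp only [solution_alt, PySem.List.len_eq]
  by_cases hN : (discount.length : Int) < 10
  · rw [if_pos hN]
    rw [show discount.length - 9 = 0 from by omega]
    simp
  · rw [if_neg hN]
    have h10 : 10 ≤ discount.length := by omega
    have hslice : PySem.List.slice discount none (some 10) = discount.take 10 := by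
      rw [PySem.List.slice_to (xs := discount) (show (0:Int) ≤ 10 by norm_num)]
      rfl
    have hcnt0 : ∀ w, ((PySem.List.slice discount none (some 10)).foldl
        (fun d x => d.insert x (d.getD x 0 + 1)) PySem.Dict.empty).getD w 0
        = (((discount.drop 0).take 10).count w : Int) := by
      intro w
      rw [hslice, PySem.Dict.getD_foldl_insert_add_one]
      simp
    have hr : PySem.List.pyRange 10 (discount.length : Int) 1
        = (List.range (discount.length - 10)).map (fun k : Nat => (10:Int) + (k:Int)) := by
      rw [PySem.List.pyRange_one 10 (discount.length : Int),
          show ((discount.length : Int) - 10).toNat = discount.length - 10 from by omega]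
    rw [hr]
    obtain ⟨_, h2⟩ := bLoop_inv want number discount _ hcnt0 _ (discount.length - 10) (by omega)
    rw [h2]
    have hok0 : bOk (bNeed want number) ((PySem.List.slice discount none (some 10)).foldl
        (fun d x => d.insert x (d.getD x 0 + 1)) PySem.Dict.empty)
        = pvOkL want number ((discount.drop 0).take 10) := by
      rw [bOk_eq]
      unfold pvOkL
      congr 1
      funext p
      rw [hcnt0 p.1]
    rw [hok0]
    rw [show discount.length - 9 = (discount.length - 10) + 1 from by omega,
        List.range_succ_eq_map, List.countP_cons, List.countP_map]
    have hcomp : ((fun a => pvOkL want number ((discount.drop a).take 10)) ∘ Nat.succ)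
        = fun a => pvOkL want number ((discount.drop (a+1)).take 10) := by
      funext a; rfl
    rw [hcomp]
    simp
    exact add_comm _ _

-- ===== VERDICT (by name: the statement is the Claim_ definition above) =====
theorem solution_spec : Claim_equal_solution := by
  intro want number discount _ hpre
  unfold Pre_solution at hpre
  unfold Spec_solution
  rcases hpre with hlen | hshort
  · rw [solution_eq_countP want number discount hlen, solution_alt_eq_countP]
  · -- fewer than 10 discount days: A's loop range is empty and B returns 0 up front
    unfold solution
    rw [show PySem.List.pyRange 0 (PySem.List.len discount - 9) 1 = [] from
      PySem.List.pyRange_one_eq_nil (by simp [PySem.List.len_eq]; omega), List.foldl_nil]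
    simp only [solution_alt, PySem.List.len_eq]
    rw [if_pos (by exact_mod_cast hshort)]
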